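-- pv_equiv track=rewrite | github.com/PyEED/pyeed | pyEED/core/alignment.py | _get_numbering_string
-- ===== SOURCE A (Python) =====
-- from typing import List, Optional
--
-- def _get_numbering_string(reference: str, query: str) -> List[str]:
--     """
--     Assigns pairwise numbering to the reference and query sequences.
--
--     Args:
--         reference (str): The reference sequence.
--         query (str): The query sequence.
--
--     Returns:
--         List[str]: A list of pairwise numbering.
--
--     """
--
--     numbering = []
--     reference_counter = 0
--     query_counter = 1
--
--     for ref_pos, que_pos in zip(reference, query):
--         if ref_pos == "-":
--             numbering.append(f"{reference_counter}.{query_counter}")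
--             query_counter += 1
--         else:
--             reference_counter += 1
--             if que_pos != "-":
--                 numbering.append(f"{reference_counter}.{query_counter}")
--                 query_counter += 1
--             else:
--                 numbering.append(str(reference_counter))
--
--     return numbering
-- ===== SOURCE B (Python) =====
-- from typing import List
--
-- def _get_numbering_string(reference: str, query: str) -> List[str]:
--     # Two-pass: first build a per-position table of (reference_counter, query_counter)
--     # values, then format each position from the table and its gap pattern.
--     pairs = list(zip(reference, query))
--     table = []
--     r_cnt = 0
--     q_cnt = 1
--     for r, q in pairs:
--         if r != "-":
--             r_cnt += 1
--         table.append((r_cnt, q_cnt))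
--         if r == "-" or q != "-":
--             q_cnt += 1
--     return [
--         f"{rc}.{qc}" if (r == "-" or q != "-") else str(rc)
--         for (r, q), (rc, qc) in zip(pairs, table)
--     ]
-- ===== Notes on version B (the rewrite author's own statement) =====
-- stated objective: alternative
-- what changed: Replaces the interleaved counter-and-format loop by a counting pass that builds a per-position (reference_counter, query_counter) table, followed by a separate formatting pass that picks each output string from the table and the gap pattern.
import Mathlib
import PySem

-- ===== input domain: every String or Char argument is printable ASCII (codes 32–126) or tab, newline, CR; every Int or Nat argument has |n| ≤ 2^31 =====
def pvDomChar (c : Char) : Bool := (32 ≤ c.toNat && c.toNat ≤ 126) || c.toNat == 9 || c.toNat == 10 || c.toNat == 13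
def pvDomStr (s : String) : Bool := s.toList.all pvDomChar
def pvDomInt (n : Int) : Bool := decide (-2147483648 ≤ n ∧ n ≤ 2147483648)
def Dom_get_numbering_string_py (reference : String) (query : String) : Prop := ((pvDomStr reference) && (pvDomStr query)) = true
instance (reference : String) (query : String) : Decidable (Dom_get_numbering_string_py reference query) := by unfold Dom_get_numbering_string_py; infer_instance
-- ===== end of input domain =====

-- B changes the decomposition only: a counter table is built first, formatting is a separate pass.

-- ===== PORT A =====
-- loop body of A's single for-loop: state = (numbering, reference_counter, query_counter)
def pvStepA (st : List String × Int × Int) (p : Char × Char) : List String × Int × Int :=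
  let (numbering, rc, qc) := st
  if p.1 = '-' then
    (numbering ++ [PySem.Int.toStr rc ++ "." ++ PySem.Int.toStr qc], rc, qc + 1)
  else
    let rc' := rc + 1
    if p.2 ≠ '-' then
      (numbering ++ [PySem.Int.toStr rc' ++ "." ++ PySem.Int.toStr qc], rc', qc + 1)
    else
      (numbering ++ [PySem.Int.toStr rc'], rc', qc)

def get_numbering_string_py (reference : String) (query : String) : List String :=
  ((reference.toList.zip query.toList).foldl pvStepA ([], 0, 1)).1

-- ===== PORT B =====
-- first pass of B: build the table of (reference_counter, query_counter) per position
def pvStepT (st : List (Int × Int) × Int × Int) (p : Char × Char) : List (Int × Int) × Int × Int :=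
  let (table, rc, qc) := st
  let rc' := if p.1 ≠ '-' then rc + 1 else rc
  let qc' := if p.1 = '-' ∨ p.2 ≠ '-' then qc + 1 else qc
  (table ++ [(rc', qc)], rc', qc')

-- second pass of B: format one position from its (ref,que) pair and table entry
def pvFmt (pc : (Char × Char) × (Int × Int)) : String :=
  if pc.1.1 = '-' ∨ pc.1.2 ≠ '-' then
    PySem.Int.toStr pc.2.1 ++ "." ++ PySem.Int.toStr pc.2.2
  else
    PySem.Int.toStr pc.2.1

def get_numbering_string_py_alt (reference : String) (query : String) : List String :=
  let pairs := reference.toList.zip query.toList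
  let table := (pairs.foldl pvStepT ([], 0, 1)).1
  (pairs.zip table).map pvFmt

-- ===== PRECONDITION & SPEC =====
def Spec_get_numbering_string_py (reference : String) (query : String) (out : List String) : Prop := out = get_numbering_string_py_alt reference query
instance (reference : String) (query : String) (out : List String) : Decidable (Spec_get_numbering_string_py reference query out) := by unfold Spec_get_numbering_string_py; infer_instance

-- ===== CLAIM (what is proved, stated in full; the proofs are below) =====
def Claim_equal_get_numbering_string_py : Prop := ∀ (reference : String) (query : String), Dom_get_numbering_string_py reference query → Spec_get_numbering_string_py reference query (get_numbering_string_py reference query)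

-- ===== LEMMAS AND PROOFS =====
theorem pvStepA_acc (l : List (Char × Char)) (acc : List String) (rc qc : Int) :
    l.foldl pvStepA (acc, rc, qc)
      = (acc ++ (l.foldl pvStepA ([], rc, qc)).1, (l.foldl pvStepA ([], rc, qc)).2) := by
  induction l generalizing acc rc qc with
  | nil => simp
  | cons p l ih =>
    simp only [List.foldl_cons, pvStepA]
    split_ifs
    · simp only [List.nil_append]; rw [ih, ih [_]]; simp
    · simp only [List.nil_append]; rw [ih, ih [_]]; simp
    · simp only [List.nil_append]; rw [ih, ih [_]]; simp

theorem pvStepT_acc (l : List (Char × Char)) (acc : List (Int × Int)) (rc qc : Int) :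
    l.foldl pvStepT (acc, rc, qc)
      = (acc ++ (l.foldl pvStepT ([], rc, qc)).1, (l.foldl pvStepT ([], rc, qc)).2) := by
  induction l generalizing acc rc qc with
  | nil => simp
  | cons p l ih =>
    simp only [List.foldl_cons, pvStepT]
    split_ifs <;> (simp only [List.nil_append]; rw [ih, ih [_]]; simp)

theorem pv_main (l : List (Char × Char)) (rc qc : Int) :
    (l.foldl pvStepA ([], rc, qc)).1
      = (l.zip (l.foldl pvStepT ([], rc, qc)).1).map pvFmt := by
  induction l generalizing rc qc with
  | nil => simp
  | cons p l ih =>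
    obtain ⟨rc2, qc2, s, hA, hT, hs⟩ :
        ∃ rc2 qc2 s, pvStepA ([], rc, qc) p = ([s], rc2, qc2) ∧
          pvStepT ([], rc, qc) p = ([(rc2, qc)], rc2, qc2) ∧ pvFmt (p, (rc2, qc)) = s := by
      by_cases h1 : p.1 = '-'
      · exact ⟨rc, qc + 1, PySem.Int.toStr rc ++ "." ++ PySem.Int.toStr qc,
          by simp [pvStepA, h1], by simp [pvStepT, h1], by simp [pvFmt, h1]⟩
      · by_cases h2 : p.2 = '-'
        · exact ⟨rc + 1, qc, PySem.Int.toStr (rc + 1),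
            by simp [pvStepA, h1, h2], by simp [pvStepT, h1, h2], by simp [pvFmt, h1, h2]⟩
        · exact ⟨rc + 1, qc + 1, PySem.Int.toStr (rc + 1) ++ "." ++ PySem.Int.toStr qc,
            by simp [pvStepA, h1, h2], by simp [pvStepT, h1, h2], by simp [pvFmt, h1, h2]⟩
    rw [List.foldl_cons, List.foldl_cons, hA, hT, pvStepA_acc, pvStepT_acc]
    simp [ih, hs]

-- ===== VERDICT (by name: the statement is the Claim_ definition above) =====
theorem get_numbering_string_py_spec : Claim_equal_get_numbering_string_py := by
  intro reference query _
  unfold Spec_get_numbering_string_py get_numbering_string_py get_numbering_string_py_alt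
  exact pv_main _ 0 1
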